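-- pv_equiv track=rewrite | github.com/iliyaruvinsky/xsodus_converter | pipelines/xml-to-sql/src/xml_to_sql/abap/sql_to_abap.py | _split_ctes_and_final
-- ===== SOURCE A (Python) =====
-- from typing import Dict, List, Optional, Tuple, Set
--
-- def _split_ctes_and_final(sql: str) -> Tuple[str, str]:
--     """Split SQL into CTE section and final SELECT."""
--     # Find the final SELECT (not inside parentheses)
--     depth = 0
--     last_select_pos = -1
--
--     i = 0
--     while i < len(sql):
--         if sql[i] == '(':
--             depth += 1
--         elif sql[i] == ')':
--             depth -= 1
--         elif depth == 0 and sql[i:i+6].upper() == 'SELECT':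
--             last_select_pos = i
--         i += 1
--
--     if last_select_pos == -1:
--         raise ValueError("No final SELECT found in SQL")
--
--     cte_section = sql[:last_select_pos].strip()
--     final_select = sql[last_select_pos:].strip()
--
--     # Remove trailing comma from CTE section if present
--     if cte_section.endswith(','):
--         cte_section = cte_section[:-1].strip()
--
--     return cte_section, final_select
-- ===== SOURCE B (Python) =====
-- def _split_ctes_and_final(sql):
--     """Split SQL into CTE section and final SELECT.
--
--     B: instead of a forward character-by-character scan with a running paren
--     depth, search right-to-left with str.rfind for case-insensitive 'SELECT'
--     occurrences and, for each candidate, test top-levelness by comparing the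
--     counts of '(' and ')' in the prefix; stop at the first (rightmost) hit.
--     """
--     u = sql.upper()
--     end = len(sql)
--     while True:
--         i = u.rfind('SELECT', 0, end)
--         if i == -1:
--             raise ValueError("No final SELECT found in SQL")
--         prefix = sql[:i]
--         if prefix.count('(') == prefix.count(')'):
--             break
--         end = i + 5  # continue strictly left of i ('SELECT' cannot overlap itself)
--     cte_section = sql[:i].strip()
--     final_select = sql[i:].strip()
--     if cte_section.endswith(','):
--         cte_section = cte_section[:-1].strip()
--     return cte_section, final_select
-- ===== Notes on version B (the rewrite author's own statement) =====
-- stated objective: alternative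
-- what changed: A's forward character scan with a running parenthesis depth is replaced by a right-to-left search: str.rfind locates case-insensitive SELECT candidates from the end and each candidate's top-levelness is checked by comparing '(' and ')' counts in its prefix, stopping at the first hit.
import Mathlib
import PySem

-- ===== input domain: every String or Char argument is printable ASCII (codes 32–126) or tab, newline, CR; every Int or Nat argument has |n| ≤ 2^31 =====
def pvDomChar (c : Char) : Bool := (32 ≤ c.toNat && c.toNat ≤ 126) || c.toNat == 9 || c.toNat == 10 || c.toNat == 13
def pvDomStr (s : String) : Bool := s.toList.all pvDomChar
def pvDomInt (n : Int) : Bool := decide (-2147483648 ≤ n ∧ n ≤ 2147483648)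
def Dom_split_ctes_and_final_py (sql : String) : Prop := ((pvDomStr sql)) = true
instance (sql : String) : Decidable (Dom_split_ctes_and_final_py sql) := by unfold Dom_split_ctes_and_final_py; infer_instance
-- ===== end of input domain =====

-- B replaces A's forward scan with a running paren depth by a right-to-left
-- str.rfind search over SELECT candidates, each checked by counting '(' and ')'
-- in its prefix; first (rightmost) hit wins.

-- ===== PORT A =====
-- A's while-loop: recursion on the remaining suffix, carrying (depth, last_select_pos, i);
-- sql[i:i+6] is exactly `take 6` of the current suffix (i ≤ len sql throughout).
def aLoop : List Char → Int → Int → Nat → Int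
  | [], _, last, _ => last
  | c :: rest, depth, last, i =>
    if c = '(' then aLoop rest (depth + 1) last (i + 1)
    else if c = ')' then aLoop rest (depth - 1) last (i + 1)
    else if depth = 0 ∧ PySem.Chars.upper ((c :: rest).take 6) = "SELECT".toList then
      aLoop rest depth (i : Int) (i + 1)
    else aLoop rest depth last (i + 1)

def split_ctes_and_final_py (sql : String) : String × String :=
  let cs := sql.toList
  let last := aLoop cs 0 (-1) 0
  if last = -1 then ("", "")  -- Python raises ValueError here; excluded by Pre_
  else
    let cte := PySem.Chars.strip (PySem.List.slice cs none (some last))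
    let fin := PySem.Chars.strip (PySem.List.slice cs (some last) none)
    let cte := if PySem.Chars.endswith cte [','] then
        PySem.Chars.strip (PySem.List.slice cte none (some (-1)))
      else cte
    (String.ofList cte, String.ofList fin)

-- ===== PORT B =====
-- hand port of u.rfind("SELECT", 0, e) as Source B calls it (0 ≤ e ≤ len(u)): the HIGHEST
-- index j whose 6-char match lies fully inside u[0:e]; Python's -1 sentinel is ported
-- as none. Exact on this use (nonempty pattern, in-range bounds).
def bRfind (u : List Char) (e : Nat) : Option Nat :=
  ((List.range u.length).filter
    (fun j => decide (j + 6 ≤ e) && List.isPrefixOf "SELECT".toList (u.drop j))).getLast?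

-- termination fact the port cites: a hit ends inside u[0:e]
lemma bRfind_bound {u : List Char} {e i : Nat} (h : bRfind u e = some i) : i + 6 ≤ e := by
  have hm : i ∈ (List.range u.length).filter
      (fun j => decide (j + 6 ≤ e) && List.isPrefixOf "SELECT".toList (u.drop j)) := by
    have := List.getLast?_eq_some_iff.mp h
    obtain ⟨l, hl⟩ := this
    rw [hl]; exact List.mem_append_right _ (List.mem_singleton.mpr rfl)
  have := (List.mem_filter.mp hm).2
  rw [Bool.and_eq_true, decide_eq_true_iff] at this
  exact this.1

-- Source B's while-loop: i = u.rfind('SELECT', 0, end); break when the prefix's '(' and ')'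
-- counts agree, else end = i + 5 (sql[:i] is slice-to, str.count of a 1-char pattern)
def bLoop (cs u : List Char) (e : Nat) : Option Nat :=
  match h : bRfind u e with
  | none => none
  | some i =>
    if PySem.Chars.count (PySem.List.slice cs none (some (i : Int))) ['('] =
       PySem.Chars.count (PySem.List.slice cs none (some (i : Int))) [')'] then some i
    else bLoop cs u (i + 5)
termination_by e
decreasing_by have := bRfind_bound h; omega

def split_ctes_and_final_py_alt (sql : String) : String × String :=
  let cs := sql.toList
  let u := PySem.Chars.upper cs
  match bLoop cs u cs.length with
  | none => ("", "")  -- Python raises ValueError here; excluded by Pre_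
  | some i =>
    let cte := PySem.Chars.strip (PySem.List.slice cs none (some (i : Int)))
    let fin := PySem.Chars.strip (PySem.List.slice cs (some (i : Int)) none)
    let cte := if PySem.Chars.endswith cte [','] then
        PySem.Chars.strip (PySem.List.slice cte none (some (-1)))
      else cte
    (String.ofList cte, String.ofList fin)

-- ===== PRECONDITION & SPEC =====
-- Pre_: there is a top-level (paren-depth-0) case-insensitive SELECT; otherwise BOTH
-- Pythons raise ValueError.
def Pre_split_ctes_and_final_py (sql : String) : Prop :=
  ∃ i, i < sql.toList.length ∧
    ((sql.toList.take i).count '(' : Int) - ((sql.toList.take i).count ')' : Int) = 0 ∧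
    "SELECT".toList <+: PySem.Chars.upper (sql.toList.drop i)

instance (sql : String) : Decidable (Pre_split_ctes_and_final_py sql) := by
  unfold Pre_split_ctes_and_final_py; infer_instance

def pvWitness_split_ctes_and_final_py : String := "WITH t AS (SELECT 1), SELECT * FROM t"

def Spec_split_ctes_and_final_py (sql : String) (out : String × String) : Prop := out = split_ctes_and_final_py_alt sql
instance (sql : String) (out : String × String) : Decidable (Spec_split_ctes_and_final_py sql out) := by unfold Spec_split_ctes_and_final_py; infer_instance

-- ===== CLAIM (what is proved, stated in full; the proofs are below) =====
def Claim_equal_split_ctes_and_final_py : Prop := ∀ (sql : String), Dom_split_ctes_and_final_py sql → Pre_split_ctes_and_final_py sql → Spec_split_ctes_and_final_py sql (split_ctes_and_final_py sql)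

-- ===== LEMMAS AND PROOFS =====

-- proof-side list of the depth-0 SELECT positions, mirroring aLoop's branch structure
def cand : List Char → Int → Nat → List Nat
  | [], _, _ => []
  | c :: rest, d, i =>
    if c = '(' then cand rest (d + 1) (i + 1)
    else if c = ')' then cand rest (d - 1) (i + 1)
    else if d = 0 ∧ PySem.Chars.upper ((c :: rest).take 6) = "SELECT".toList then
      i :: cand rest d (i + 1)
    else cand rest d (i + 1)

lemma aLoop_eq (cs : List Char) : ∀ (d last : Int) (i : Nat),
    aLoop cs d last i = match (cand cs d i).getLast? with
      | none => last
      | some j => (j : Int) := by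
  induction cs with
  | nil => intro d last i; simp [aLoop, cand]
  | cons c rest ih =>
    intro d last i
    simp only [aLoop, cand]
    split_ifs with h1 h2 h3
    · exact ih _ _ _
    · exact ih _ _ _
    · rw [ih d i (i+1)]
      cases h : (cand rest d (i+1)).getLast? with
      | none => simp [List.getLast?_cons, h]
      | some j => simp [List.getLast?_cons, h]
    · exact ih _ _ _

lemma cand_shift (cs : List Char) : ∀ (d : Int) (i : Nat),
    cand cs d (i + 1) = (cand cs d i).map (· + 1) := by
  induction cs with
  | nil => intro d i; simp [cand]
  | cons c rest ih =>
    intro d i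
    simp only [cand]
    split_ifs with h1 h2 h3
    · exact ih _ _
    · exact ih _ _
    · simp [ih]
    · exact ih _ _

lemma sel_iff (l : List Char) :
    (List.isPrefixOf "SELECT".toList (PySem.Chars.upper l) = true)
      ↔ (PySem.Chars.upper (l.take 6) = "SELECT".toList) := by
  rw [List.isPrefixOf_iff_prefix, List.prefix_iff_eq_take]
  show _ ↔ List.map _ _ = _
  rw [List.map_take]
  have h6 : ("SELECT".toList).length = 6 := rfl
  rw [h6, eq_comm]
  exact Iff.rfl

lemma map_succ_eq (l : List Nat) : List.map Nat.succ l = List.map (· + 1) l := by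
  simp

lemma cand_one (cs : List Char) (d : Int) :
    cand cs d 1 = (cand cs d 0).map (· + 1) := by
  exact cand_shift cs d 0

-- proof-side prefix-depth list used to bridge the paren-count test to aLoop's depth
def bDepthBefore : List Char → Int → List Int
  | [], d => [d]
  | c :: rest, d =>
      d :: bDepthBefore rest (d + (if c = '(' then 1 else 0) - (if c = ')' then 1 else 0))

lemma filter_eq_cand (cs : List Char) : ∀ (d : Int),
    (List.range cs.length).filter
      (fun i => List.isPrefixOf "SELECT".toList ((PySem.Chars.upper cs).drop i) &&
                PySem.List.pyGetD (bDepthBefore cs d) (i : Int) 0 == 0)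
      = cand cs d 0 := by
  induction cs with
  | nil => intro d; simp [cand]
  | cons c rest ih =>
    intro d
    have hup : PySem.Chars.upper (c :: rest) = PySem.Chars.upperChar c :: PySem.Chars.upper rest := rfl
    have hdb : bDepthBefore (c :: rest) d
        = d :: bDepthBefore rest (d + (if c = '(' then 1 else 0) - (if c = ')' then 1 else 0)) := rfl
    rw [List.length_cons, List.range_succ_eq_map, List.filter_cons, List.filter_map]
    have htail : (List.range rest.length).filter
        ((fun i => List.isPrefixOf "SELECT".toList ((PySem.Chars.upper (c :: rest)).drop i) &&
                  PySem.List.pyGetD (bDepthBefore (c :: rest) d) (i : Int) 0 == 0) ∘ Nat.succ)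
        = cand rest (d + (if c = '(' then 1 else 0) - (if c = ')' then 1 else 0)) 0 := by
      rw [← ih]
      apply List.filter_congr
      intro j _
      simp only [Function.comp, hup, hdb, Nat.succ_eq_add_one, List.drop_succ_cons]
      congr 1
      rw [PySem.List.pyGetD_natCast, PySem.List.pyGetD_natCast, List.getD_cons_succ]
    rw [htail]
    have hhead : (List.isPrefixOf "SELECT".toList ((PySem.Chars.upper (c :: rest)).drop 0) &&
        PySem.List.pyGetD (bDepthBefore (c :: rest) d) ((0 : Nat) : Int) 0 == 0)
        = (decide (PySem.Chars.upper ((c :: rest).take 6) = "SELECT".toList) && decide (d = 0)) := by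
      rw [hdb, PySem.List.pyGetD_natCast, List.getD_cons_zero, List.drop_zero]
      by_cases hs : PySem.Chars.upper ((c :: rest).take 6) = "SELECT".toList
      · rw [decide_eq_true hs, (sel_iff (c :: rest)).mpr hs, Bool.true_and, Bool.true_and]
        rfl
      · have hpf : List.isPrefixOf "SELECT".toList (PySem.Chars.upper (c :: rest)) = false :=
          Bool.eq_false_iff.mpr (fun hcontra => hs ((sel_iff (c :: rest)).mp hcontra))
        rw [decide_eq_false hs, hpf, Bool.false_and, Bool.false_and]
    rw [hhead]
    by_cases hc1 : c = '('
    · have hnotsel : ¬ PySem.Chars.upper ((c :: rest).take 6) = "SELECT".toList := by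
        subst hc1; intro hcontra
        have := congrArg (fun l => l.head?) hcontra
        simp [PySem.Chars.upper] at this
        exact absurd this (by decide)
      rw [decide_eq_false hnotsel, Bool.false_and]
      subst hc1
      have h1 : cand ('(' :: rest) d 0 = cand rest (d + 1) 1 := by simp [cand]
      rw [if_neg (by simp), h1, cand_one, map_succ_eq]
      simp
    · by_cases hc2 : c = ')'
      · have hnotsel : ¬ PySem.Chars.upper ((c :: rest).take 6) = "SELECT".toList := by
          subst hc2; intro hcontra
          have := congrArg (fun l => l.head?) hcontra
          simp [PySem.Chars.upper] at this
          exact absurd this (by decide)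
        rw [decide_eq_false hnotsel, Bool.false_and]
        subst hc2
        have h1 : cand (')' :: rest) d 0 = cand rest (d - 1) 1 := by simp [cand]
        rw [if_neg (by simp), h1, cand_one, map_succ_eq]
        simp
      · have h1 : cand (c :: rest) d 0
            = if d = 0 ∧ PySem.Chars.upper ((c :: rest).take 6) = "SELECT".toList then
                0 :: cand rest d 1
              else cand rest d 1 := by
          simp [cand, hc1, hc2]
        by_cases hcond : d = 0 ∧ PySem.Chars.upper ((c :: rest).take 6) = "SELECT".toList
        · rw [decide_eq_true hcond.2, decide_eq_true hcond.1, Bool.and_self,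
            if_pos rfl, h1, if_pos hcond, cand_one, map_succ_eq]
          simp [hc1, hc2, hcond.1]
        · have hfalse : (decide (PySem.Chars.upper ((c :: rest).take 6) = "SELECT".toList) &&
              decide (d = 0)) = false := by
            rcases not_and_or.mp hcond with h | h
            · rw [decide_eq_false h, Bool.and_false]
            · rw [decide_eq_false h, Bool.false_and]
          rw [hfalse, if_neg (by simp), h1, if_neg hcond, cand_one, map_succ_eq]
          simp [hc1, hc2]

-- depth_before[i] is the prefix paren count
lemma bDepth_getD (cs : List Char) : ∀ (d : Int) (i : Nat), i ≤ cs.length →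
    (bDepthBefore cs d).getD i 0
      = d + ((cs.take i).count '(' : Int) - ((cs.take i).count ')' : Int) := by
  induction cs with
  | nil =>
    intro d i h
    have hi : i = 0 := by simpa using h
    subst hi; simp [bDepthBefore]
  | cons c rest ih =>
    intro d i h
    cases i with
    | zero => simp [bDepthBefore]
    | succ j =>
      simp only [bDepthBefore, List.getD_cons_succ, List.take_succ_cons, List.count_cons]
      rw [ih _ j (by simpa using h)]
      by_cases hc1 : c = '(' <;> by_cases hc2 : c = ')' <;> simp [hc1, hc2] <;> ring_nf

-- the canonical candidate list both sides reduce to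
def csel (cs : List Char) : List Nat :=
  (List.range cs.length).filter
    (fun i => List.isPrefixOf "SELECT".toList ((PySem.Chars.upper cs).drop i) &&
              decide ((cs.take i).count '(' = (cs.take i).count ')'))

lemma csel_eq_cand (cs : List Char) : csel cs = cand cs 0 0 := by
  rw [← filter_eq_cand cs 0]
  apply List.filter_congr
  intro i hi
  have hle : i ≤ cs.length := le_of_lt (List.mem_range.mp hi)
  congr 1
  rw [PySem.List.pyGetD_natCast, bDepth_getD cs 0 i hle]
  by_cases hcount : (cs.take i).count '(' = (cs.take i).count ')'
  · have hz : (0 : Int) + ((cs.take i).count '(' : Int) - ((cs.take i).count ')' : Int) = 0 := by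
      omega
    rw [decide_eq_true hcount]
    exact (beq_iff_eq.mpr hz).symm
  · have hz : ¬ ((0 : Int) + ((cs.take i).count '(' : Int) - ((cs.take i).count ')' : Int) = 0) := by
      intro hcontra; apply hcount; omega
    rw [decide_eq_false hcount]
    exact (beq_eq_false_iff_ne.mpr hz).symm

lemma ulen (cs : List Char) : (PySem.Chars.upper cs).length = cs.length := by
  simp [PySem.Chars.upper]

-- str.count of a one-char pattern is List.count
lemma count_go_single (c : Char) (l : List Char) : ∀ (fuel acc : Nat), l.length ≤ fuel →
    PySem.Chars.count.go [c] fuel l acc = acc + l.count c := by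
  induction l with
  | nil => intro fuel acc h; cases fuel <;> simp [PySem.Chars.count.go]
  | cons a t ih =>
    intro fuel acc h
    cases fuel with
    | zero => simp at h
    | succ f =>
      have hpre : List.isPrefixOf [c] (a :: t) = (c == a) := by
        simp [List.isPrefixOf]
      rw [PySem.Chars.count.go]
      by_cases hc : c = a
      · rw [hpre, if_pos (by simp [hc])]
        have : List.drop ([c].length) (a :: t) = t := by simp
        rw [this, ih f (acc + 1) (by simpa using h)]
        simp [hc]
        omega
      · have hb : (c == a) = false := beq_eq_false_iff_ne.mpr hc
        rw [hpre, hb, if_neg (by simp)]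
        rw [ih f acc (by simpa using h)]
        have hba : (a == c) = false := beq_eq_false_iff_ne.mpr (Ne.symm hc)
        simp [List.count_cons, hba]

lemma count_single (c : Char) (l : List Char) : PySem.Chars.count l [c] = l.count c := by
  unfold PySem.Chars.count
  rw [if_neg (by simp)]
  simpa using count_go_single c l l.length 0 le_rfl

-- last element of a strictly ascending list is its maximum
lemma getLast?_le {l : List Nat} (hl : l.Pairwise (· < ·)) {i : Nat}
    (h : l.getLast? = some i) : ∀ j ∈ l, j ≤ i := by
  induction l with
  | nil => simp at h
  | cons a t ih =>
    intro j hj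
    cases t with
    | nil =>
      simp at h hj
      omega
    | cons b u =>
      rw [List.getLast?_cons_cons] at h
      rcases List.mem_cons.mp hj with rfl | hj'
      · have hb : b ∈ b :: u := List.mem_cons_self
        have := ih (List.Pairwise.of_cons hl) h
        have hab : j < b := (List.pairwise_cons.mp hl).1 b hb
        have := this b hb
        omega
      · exact ih (List.Pairwise.of_cons hl) h j hj'

lemma getLast?_of_max {l : List Nat} (hl : l.Pairwise (· < ·)) {i : Nat}
    (hi : i ∈ l) (hmax : ∀ j ∈ l, j ≤ i) : l.getLast? = some i := by
  induction l with
  | nil => simp at hi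
  | cons a t ih =>
    cases t with
    | nil => simp at hi ⊢; omega
    | cons b u =>
      rw [List.getLast?_cons_cons]
      have htail : i ∈ b :: u := by
        rcases List.mem_cons.mp hi with rfl | h'
        · exfalso
          have hb : b ∈ b :: u := List.mem_cons_self
          have h1 : i < b := (List.pairwise_cons.mp hl).1 b hb
          have h2 : b ≤ i := hmax b (List.mem_cons.mpr (Or.inr hb))
          omega
        · exact h'
      exact ih (List.Pairwise.of_cons hl) htail
        (fun j hj => hmax j (List.mem_cons.mpr (Or.inr hj)))

lemma mem_csel (cs : List Char) (j : Nat) :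
    j ∈ csel cs ↔ j < cs.length ∧
      List.isPrefixOf "SELECT".toList ((PySem.Chars.upper cs).drop j) = true ∧
      (cs.take j).count '(' = (cs.take j).count ')' := by
  unfold csel
  rw [List.mem_filter, List.mem_range, Bool.and_eq_true, decide_eq_true_iff]

lemma mem_bfilter (u : List Char) (e j : Nat) :
    (j ∈ (List.range u.length).filter
      (fun j => decide (j + 6 ≤ e) && List.isPrefixOf "SELECT".toList (u.drop j)))
    ↔ j < u.length ∧ j + 6 ≤ e ∧ List.isPrefixOf "SELECT".toList (u.drop j) = true := by
  rw [List.mem_filter, List.mem_range, Bool.and_eq_true, decide_eq_true_iff]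

lemma bfilter_sorted (u : List Char) (e : Nat) :
    List.Pairwise (· < ·) ((List.range u.length).filter
      (fun j => decide (j + 6 ≤ e) && List.isPrefixOf "SELECT".toList (u.drop j))) :=
  List.Pairwise.filter _ List.pairwise_lt_range

lemma csel_sorted (cs : List Char) : List.Pairwise (· < ·) (csel cs) :=
  List.Pairwise.filter _ List.pairwise_lt_range

lemma bLoop_eq (cs : List Char) : ∀ (e : Nat), (∀ j ∈ csel cs, j + 6 ≤ e) →
    bLoop cs (PySem.Chars.upper cs) e = (csel cs).getLast? := by
  intro e
  induction e using Nat.strong_induction_on with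
  | _ e ih =>
    intro hinv
    have hsub : ∀ j ∈ csel cs, j ∈ (List.range (PySem.Chars.upper cs).length).filter
        (fun j => decide (j + 6 ≤ e) &&
          List.isPrefixOf "SELECT".toList ((PySem.Chars.upper cs).drop j)) := by
      intro j hj
      obtain ⟨h1, h2, _⟩ := (mem_csel cs j).mp hj
      exact (mem_bfilter _ e j).mpr ⟨by rw [ulen]; exact h1, hinv j hj, h2⟩
    rw [bLoop]
    split
    next hr =>
      have hempty := List.getLast?_eq_none_iff.mp hr
      have : csel cs = [] := by
        cases hc : csel cs with
        | nil => rfl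
        | cons a t =>
          exfalso
          have := hsub a (by rw [hc]; exact List.mem_cons_self)
          rw [hempty] at this
          exact absurd this (List.not_mem_nil)
      rw [this]; rfl
    next i hr =>
      have himem : i ∈ (List.range (PySem.Chars.upper cs).length).filter
          (fun j => decide (j + 6 ≤ e) &&
            List.isPrefixOf "SELECT".toList ((PySem.Chars.upper cs).drop j)) := by
        have := List.getLast?_eq_some_iff.mp hr
        obtain ⟨l, hl⟩ := this
        rw [hl]; exact List.mem_append_right _ (List.mem_singleton.mpr rfl)
      have himax := getLast?_le (bfilter_sorted _ e) hr
      obtain ⟨hilen, hie, hipre⟩ := (mem_bfilter _ e i).mp himem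
      rw [PySem.List.slice_to_natCast, count_single, count_single]
      by_cases hcnt : (cs.take i).count '(' = (cs.take i).count ')'
      · rw [if_pos hcnt]
        have hiC : i ∈ csel cs :=
          (mem_csel cs i).mpr ⟨by rw [← ulen cs]; exact hilen, hipre, hcnt⟩
        exact (getLast?_of_max (csel_sorted cs) hiC
          (fun j hj => himax j (hsub j hj))).symm
      · rw [if_neg hcnt]
        have hlt : i + 5 < e := by omega
        apply ih (i + 5) hlt
        intro j hj
        have hji : j ≤ i := himax j (hsub j hj)
        have hne : j ≠ i := by
          intro hcontra
          exact hcnt (by rw [← hcontra]; exact ((mem_csel cs j).mp hj).2.2)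
        omega

-- ===== VERDICT (by name: the statement is the Claim_ definition above) =====
theorem split_ctes_and_final_py_spec : Claim_equal_split_ctes_and_final_py := by
  intro sql _ hpre
  unfold Spec_split_ctes_and_final_py split_ctes_and_final_py split_ctes_and_final_py_alt
  have hinv : ∀ j ∈ csel sql.toList, j + 6 ≤ sql.toList.length := by
    intro j hj
    obtain ⟨_, hpre', _⟩ := (mem_csel sql.toList j).mp hj
    have := List.IsPrefix.length_le (List.isPrefixOf_iff_prefix.mp hpre')
    have hdl : ((PySem.Chars.upper sql.toList).drop j).length
        = (PySem.Chars.upper sql.toList).length - j := List.length_drop ..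
    rw [hdl, ulen] at this
    have h6 : ("SELECT".toList).length = 6 := rfl
    omega
  simp only [aLoop_eq, bLoop_eq sql.toList sql.toList.length hinv, csel_eq_cand]
  cases h : (cand sql.toList 0 0).getLast? with
  | none =>
    exfalso
    obtain ⟨i, hilen, hdepth, hsel⟩ := hpre
    have hmem : i ∈ cand sql.toList 0 0 := by
      rw [← csel_eq_cand, mem_csel]
      refine ⟨hilen, ?_, by omega⟩
      rw [List.isPrefixOf_iff_prefix]
      have : (PySem.Chars.upper sql.toList).drop i = PySem.Chars.upper (sql.toList.drop i) :=
        (List.map_drop ..).symm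
      rw [this]
      exact hsel
    rw [List.getLast?_eq_none_iff.mp h] at hmem
    exact absurd hmem (List.not_mem_nil)
  | some pos =>
    have hne : ((pos : Nat) : Int) ≠ -1 := by omega
    simp [hne]
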